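-- pv_equiv track=rewrite | github.com/ademismkv/Telegram-Opp-Bot | bot_chat.py | build_limited_context
-- ===== SOURCE A (Python) =====
-- def build_limited_context(messages, max_chars):
--     context = []
--     total = 0
--     for msg in messages:
--         if total + len(msg) > max_chars:
--             break
--         context.append(msg)
--         total += len(msg)
--     return "\n---\n".join(context)
-- ===== SOURCE B (Python) =====
-- def build_limited_context(messages, max_chars):
--     # Table-driven: prefix sums of lengths, then count how many prefixes fit,
--     # then join that slice.
--     prefix = []
--     t = 0
--     for m in messages:
--         t += len(m)
--         prefix.append(t)
--     k = sum(1 for p in prefix if p <= max_chars)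
--     return "\n---\n".join(messages[:k])
-- ===== Notes on version B (the rewrite author's own statement) =====
-- stated objective: alternative
-- what changed: Replaces the stateful early-break accumulation loop with a prefix-sum table: compute cumulative lengths, count how many cumulative sums fit within max_chars (valid since the sums are non-decreasing), and join that slice of messages.
import Mathlib
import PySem

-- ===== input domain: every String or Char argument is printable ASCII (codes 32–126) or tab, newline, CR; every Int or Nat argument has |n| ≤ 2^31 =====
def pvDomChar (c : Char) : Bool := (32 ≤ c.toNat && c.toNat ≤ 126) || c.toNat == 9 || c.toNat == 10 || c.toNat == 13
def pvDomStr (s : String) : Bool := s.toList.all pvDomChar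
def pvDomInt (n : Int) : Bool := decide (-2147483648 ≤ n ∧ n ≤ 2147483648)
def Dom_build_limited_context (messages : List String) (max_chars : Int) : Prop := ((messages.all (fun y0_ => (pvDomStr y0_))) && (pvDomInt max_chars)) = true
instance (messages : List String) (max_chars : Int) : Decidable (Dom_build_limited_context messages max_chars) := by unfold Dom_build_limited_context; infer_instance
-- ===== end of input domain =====

-- B replaces A's stateful early-break loop by a prefix-sum table + count + slice (objective: alternative decomposition, same cost).

-- ===== PORT A =====
-- A's for-loop with break, carrying the accumulated context and running total
def buildLoopA (msgs : List String) (mx : Int) (ctx : List String) (total : Int) : List String :=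
  match msgs with
  | [] => ctx
  | m :: rest =>
    if total + (PySem.Str.len m : Int) > mx then ctx
    else buildLoopA rest mx (ctx ++ [m]) (total + (PySem.Str.len m : Int))

def build_limited_context (messages : List String) (max_chars : Int) : String :=
  PySem.Str.join "\n---\n" (buildLoopA messages max_chars [] 0)

-- ===== PORT B =====
-- B's first loop: cumulative lengths (prefix sums) starting from t
def prefixSums (msgs : List String) (t : Int) : List Int :=
  match msgs with
  | [] => []
  | m :: rest => (t + (PySem.Str.len m : Int)) :: prefixSums rest (t + (PySem.Str.len m : Int))

def build_limited_context_alt (messages : List String) (max_chars : Int) : String :=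
  PySem.Str.join "\n---\n"
    (messages.take
      ((prefixSums messages 0).foldl (fun acc p => if p ≤ max_chars then acc + 1 else acc) (0 : Nat)))

-- ===== PRECONDITION & SPEC =====
def Spec_build_limited_context (messages : List String) (max_chars : Int) (out : String) : Prop := out = build_limited_context_alt messages max_chars
instance (messages : List String) (max_chars : Int) (out : String) : Decidable (Spec_build_limited_context messages max_chars out) := by unfold Spec_build_limited_context; infer_instance

-- ===== CLAIM (what is proved, stated in full; the proofs are below) =====
def Claim_equal_build_limited_context : Prop := ∀ (messages : List String) (max_chars : Int), Dom_build_limited_context messages max_chars → Spec_build_limited_context messages max_chars (build_limited_context messages max_chars)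

-- ===== LEMMAS AND PROOFS =====

-- every prefix sum starting at t is ≥ t (message lengths are nonnegative)
lemma prefixSums_ge (msgs : List String) (t : Int) : ∀ p ∈ prefixSums msgs t, t ≤ p := by
  induction msgs generalizing t with
  | nil => simp [prefixSums]
  | cons m rest ih =>
    intro p hp
    simp only [prefixSums, List.mem_cons] at hp
    have hL : (0 : Int) ≤ (PySem.Str.len m : Int) := Int.natCast_nonneg _
    rcases hp with rfl | hp
    · omega
    · have := ih (t + (PySem.Str.len m : Int)) p hp; omega

-- B's counting fold equals countP (on any starting accumulator)
lemma foldl_count (l : List Int) (mx : Int) (n : Nat) :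
    l.foldl (fun acc p => if p ≤ mx then acc + 1 else acc) n
      = n + l.countP (fun p => decide (p ≤ mx)) := by
  induction l generalizing n with
  | nil => simp
  | cons p rest ih =>
    simp only [List.foldl_cons, List.countP_cons, ih]
    by_cases h : p ≤ mx <;> simp [h] <;> try omega

-- A's loop returns ctx ++ the slice of msgs whose prefix sums (from total) fit in mx
lemma buildLoopA_eq (msgs : List String) (mx : Int) :
    ∀ (ctx : List String) (total : Int),
      buildLoopA msgs mx ctx total
        = ctx ++ msgs.take ((prefixSums msgs total).countP (fun p => decide (p ≤ mx))) := by
  induction msgs with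
  | nil => intro ctx total; simp [buildLoopA, prefixSums]
  | cons m rest ih =>
    intro ctx total
    simp only [buildLoopA, prefixSums, List.countP_cons, PySem.Str.len_eq, String.length_toList, gt_iff_lt]
    by_cases h : mx < total + (m.length : Int)
    · have hz : (prefixSums rest (total + (PySem.Str.len m : Int))).countP
          (fun p => decide (p ≤ mx)) = 0 := by
        rw [List.countP_eq_zero]
        intro p hp
        have := prefixSums_ge rest (total + (PySem.Str.len m : Int)) p hp
        simp only [decide_eq_true_eq, PySem.Str.len_eq, String.length_toList] at *
        omega
      rw [if_pos h]
      simp only [PySem.Str.len_eq, String.length_toList] at hz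
      simp [hz, show ¬(total + (m.length : Int) ≤ mx) from by omega]
    · rw [if_neg h, ih (ctx ++ [m]) (total + (m.length : Int))]
      have hle : total + (m.length : Int) ≤ mx := by omega
      simp [hle, List.take_succ_cons, List.append_assoc]

-- ===== VERDICT (by name: the statement is the Claim_ definition above) =====
theorem build_limited_context_spec : Claim_equal_build_limited_context := by
  intro messages max_chars _
  unfold Spec_build_limited_context build_limited_context build_limited_context_alt
  rw [buildLoopA_eq messages max_chars [] 0, foldl_count]
  simp
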